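-- pv_equiv track=rewrite | github.com/stenknutsen/HomeGrownPOSTagger | PhaseThreeTagging.py | as_UNK_as_AdjectiveTagger
-- ===== SOURCE A (Python) =====
-- def as_UNK_as_AdjectiveTagger(sent):
--     sentToReturn = []
--     skip = 0
--
--     for i in range(len(sent)):
--
--         if skip>0:
--             skip = skip -1
--             continue
--
--         if (i)<0 | (i+2)>=len(sent):
--             sentToReturn += [sent[i]]
--             continue
--
--         leftContext = sent[i]
--         target = sent[i+1]
--         rightContext = sent[i+2]
--
--         if (leftContext[0].lower()=="as")&(rightContext[0].lower()=="as"):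
--
--             sentToReturn += [(leftContext[0],"RB")]
--             sentToReturn += [(target[0],"JJ")]
--             sentToReturn += [(rightContext[0],"IN")]
--             skip = 2
--
--         else:
--             sentToReturn += [leftContext]
--
--     return sentToReturn
-- ===== SOURCE B (Python) =====
-- def as_UNK_as_AdjectiveTagger(sent):
--     # Structural recursion on the sentence: consume a 3-token "as X as" block
--     # or one token at a time; no index bookkeeping, no skip counter.
--     if len(sent) >= 3 and sent[0][0].lower() == "as" and sent[2][0].lower() == "as":
--         return [(sent[0][0], "RB"), (sent[1][0], "JJ"), (sent[2][0], "IN")] \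
--                + as_UNK_as_AdjectiveTagger(sent[3:])
--     elif sent:
--         return [sent[0]] + as_UNK_as_AdjectiveTagger(sent[1:])
--     else:
--         return []
-- ===== Notes on version B (the rewrite author's own statement) =====
-- stated objective: simpler
-- what changed: Replaced the indexed for-loop with a skip countdown and end-guard arithmetic by structural recursion on the list that consumes either a 3-token 'as X as' block or a single token per step.
import Mathlib
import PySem

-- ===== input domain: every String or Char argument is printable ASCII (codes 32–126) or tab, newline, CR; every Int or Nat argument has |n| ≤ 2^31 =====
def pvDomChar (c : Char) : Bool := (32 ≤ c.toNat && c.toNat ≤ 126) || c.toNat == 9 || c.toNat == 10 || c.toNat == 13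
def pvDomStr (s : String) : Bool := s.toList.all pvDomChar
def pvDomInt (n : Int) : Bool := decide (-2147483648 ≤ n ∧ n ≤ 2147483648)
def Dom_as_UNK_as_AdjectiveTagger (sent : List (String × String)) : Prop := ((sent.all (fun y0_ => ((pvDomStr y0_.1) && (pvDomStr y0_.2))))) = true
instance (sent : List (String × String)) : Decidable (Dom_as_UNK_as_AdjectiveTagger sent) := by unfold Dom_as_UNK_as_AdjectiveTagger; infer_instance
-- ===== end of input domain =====

-- B replaces A's indexed loop with a skip countdown by structural recursion consuming a
-- 3-token "as X as" block or one token per step (objective: simpler).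

-- ===== PORT A =====
-- Loop body of A's `for i in range(len(sent))`; state = (skip, sentToReturn).
-- `(i)<0 | (i+2)>=len(sent)` is Python's chained comparison i < (0|(i+2)) >= len(sent),
-- i.e. (i < i+2) and (i+2 >= len(sent)); ported literally below.
-- Indices i, i+1, i+2 are always in range when read, so pyGetD's default is never used.
def pvStepA (sent : List (String × String)) (st : Int × List (String × String)) (i : Int) :
    Int × List (String × String) :=
  let skip := st.1
  let acc := st.2
  if skip > 0 then (skip - 1, acc)
  else if i < i + 2 ∧ (sent.length : Int) ≤ i + 2 then (skip, acc ++ [PySem.List.pyGetD sent i ("", "")])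
  else
    let leftContext := PySem.List.pyGetD sent i ("", "")
    let target := PySem.List.pyGetD sent (i + 1) ("", "")
    let rightContext := PySem.List.pyGetD sent (i + 2) ("", "")
    if (PySem.Str.lower leftContext.1 == "as") && (PySem.Str.lower rightContext.1 == "as") then
      (2, acc ++ [(leftContext.1, "RB")] ++ [(target.1, "JJ")] ++ [(rightContext.1, "IN")])
    else (skip, acc ++ [leftContext])

def as_UNK_as_AdjectiveTagger (sent : List (String × String)) : List (String × String) :=
  ((PySem.List.pyRange 0 (sent.length : Int) 1).foldl (pvStepA sent) (0, [])).2

-- ===== PORT B =====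
def as_UNK_as_AdjectiveTagger_alt : List (String × String) → List (String × String)
  | a :: b :: c :: rest =>
    if PySem.Str.lower a.1 == "as" && PySem.Str.lower c.1 == "as" then
      (a.1, "RB") :: (b.1, "JJ") :: (c.1, "IN") :: as_UNK_as_AdjectiveTagger_alt rest
    else
      a :: as_UNK_as_AdjectiveTagger_alt (b :: c :: rest)
  | l => l

-- ===== PRECONDITION & SPEC =====
def Spec_as_UNK_as_AdjectiveTagger (sent : List (String × String)) (out : List (String × String)) : Prop := out = as_UNK_as_AdjectiveTagger_alt sent
instance (sent : List (String × String)) (out : List (String × String)) : Decidable (Spec_as_UNK_as_AdjectiveTagger sent out) := by unfold Spec_as_UNK_as_AdjectiveTagger; infer_instance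

-- ===== CLAIM (what is proved, stated in full; the proofs are below) =====
def Claim_equal_as_UNK_as_AdjectiveTagger : Prop := ∀ (sent : List (String × String)), Dom_as_UNK_as_AdjectiveTagger sent → Spec_as_UNK_as_AdjectiveTagger sent (as_UNK_as_AdjectiveTagger sent)

-- ===== LEMMAS AND PROOFS =====

-- A's loop from index i onward (skip = 0) equals acc ++ B on the suffix sent.drop i.
-- element of sent at index i+j read through pyGetD, from the shape of sent.drop i
theorem pv_get (sent : List (String × String)) (i j : Nat) (x : String × String)
    (h : (List.drop i sent)[j]? = some x) :
    PySem.List.pyGetD sent ((i : Int) + j) ("", "") = x := by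
  rw [List.getElem?_drop] at h
  have hc : (i : Int) + (j : Int) = ((i + j : Nat) : Int) := by push_cast; ring
  rw [hc, PySem.List.pyGetD_natCast]
  simp [List.getD_eq_getElem?_getD, h]

theorem pv_main (sent : List (String × String)) :
    ∀ m i acc, i + m = sent.length →
      ((PySem.List.pyRange (i : Int) (sent.length : Int) 1).foldl (pvStepA sent) (0, acc)).2
        = acc ++ as_UNK_as_AdjectiveTagger_alt (sent.drop i) := by
  intro m
  induction m using Nat.strong_induction_on with
  | _ m IH =>
    intro i acc hlen
    have hdl : (sent.drop i).length = m := by simp [List.length_drop]; omega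
    rcases hd : sent.drop i with _ | ⟨a, t⟩
    · -- m = 0: empty range, empty suffix
      have hm0 : m = 0 := by rw [hd] at hdl; simpa using hdl.symm
      have : PySem.List.pyRange (i : Int) (sent.length : Int) 1 = [] :=
        PySem.List.pyRange_one_eq_nil (by omega)
      simp [this, as_UNK_as_AdjectiveTagger_alt]
    · have hm1 : 1 ≤ m := by rw [hd] at hdl; simp at hdl; omega
      have hin : (i : Int) < (sent.length : Int) := by exact_mod_cast (by omega : i < sent.length)
      have ha : PySem.List.pyGetD sent (i : Int) ("", "") = a := by
        simpa using pv_get sent i 0 a (by simp [hd])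
      rw [PySem.List.pyRange_one_cons hin]
      by_cases h2 : (sent.length : Int) ≤ (i : Int) + 2
      · -- fewer than 3 tokens remain: copy one token, recurse
        have hm2 : m ≤ 2 := by omega
        have hstep : pvStepA sent (0, acc) i = (0, acc ++ [a]) := by
          simp [pvStepA, h2, ha]
        have hdrop : sent.drop (i + 1) = t := by
          have : sent.drop (i + 1) = (sent.drop i).drop 1 := by
            rw [List.drop_drop]
          rw [this, hd]; simp
        have hih := IH (m - 1) (by omega) (i + 1) (acc ++ [a]) (by omega)
        have hc : ((i + 1 : Nat) : Int) = (i : Int) + 1 := by push_cast; ring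
        rw [hc, hdrop] at hih
        rw [List.foldl_cons, hstep, hih]
        have htail : as_UNK_as_AdjectiveTagger_alt (a :: t) = a :: as_UNK_as_AdjectiveTagger_alt t := by
          rcases t with _ | ⟨b, t2⟩
          · simp [as_UNK_as_AdjectiveTagger_alt]
          · rcases t2 with _ | ⟨c, t3⟩
            · simp [as_UNK_as_AdjectiveTagger_alt]
            · exfalso; rw [hd] at hdl; simp at hdl; omega
        rw [htail]; simp
      · -- at least 3 tokens remain
        have hm3 : 3 ≤ m := by
          by_contra h; push Not at h
          have : (sent.length : Int) ≤ (i : Int) + 2 := by exact_mod_cast (by omega : sent.length ≤ i + 2)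
          exact h2 this
        rcases ht : t with _ | ⟨b, t2⟩
        · exfalso; rw [hd, ht] at hdl; simp at hdl; omega
        rcases ht2 : t2 with _ | ⟨c, t3⟩
        · exfalso; rw [hd, ht, ht2] at hdl; simp at hdl; omega
        subst ht ht2
        have hb : PySem.List.pyGetD sent ((i : Int) + 1) ("", "") = b := by
          simpa using pv_get sent i 1 b (by simp [hd])
        have hcgd : PySem.List.pyGetD sent ((i : Int) + 2) ("", "") = c := by
          simpa using pv_get sent i 2 c (by simp [hd])
        have hdrop1 : sent.drop (i + 1) = b :: c :: t3 := by
          have : sent.drop (i + 1) = (sent.drop i).drop 1 := by rw [List.drop_drop]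
          rw [this, hd]; simp
        have hdrop3 : sent.drop (i + 3) = t3 := by
          have : sent.drop (i + 3) = (sent.drop i).drop 3 := by rw [List.drop_drop]
          rw [this, hd]; simp
        by_cases hcond : (PySem.Str.lower a.1 == "as") && (PySem.Str.lower c.1 == "as")
        · -- match: emit RB/JJ/IN, skip the next two indices
          have hstep : pvStepA sent (0, acc) i
              = (2, acc ++ [(a.1, "RB")] ++ [(b.1, "JJ")] ++ [(c.1, "IN")]) := by
            simp only [pvStepA, ha, hb, hcgd]
            rw [if_neg (by omega), if_neg (by omega), if_pos hcond]
          have hi1 : (i : Int) + 1 < (sent.length : Int) := by omega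
          have hi2 : (i : Int) + 1 + 1 < (sent.length : Int) := by omega
          rw [List.foldl_cons, hstep,
            PySem.List.pyRange_one_cons hi1, List.foldl_cons,
            PySem.List.pyRange_one_cons hi2, List.foldl_cons]
          have hs2 : ∀ j st, pvStepA sent (2, st) j = (1, st) := by
            intro j st; simp [pvStepA]
          have hs1 : ∀ j st, pvStepA sent (1, st) j = (0, st) := by
            intro j st; simp [pvStepA]
          rw [hs2, hs1]
          have hih := IH (m - 3) (by omega) (i + 3)
            (acc ++ [(a.1, "RB")] ++ [(b.1, "JJ")] ++ [(c.1, "IN")]) (by omega)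
          have hc3 : ((i + 3 : Nat) : Int) = (i : Int) + 1 + 1 + 1 := by push_cast; ring
          rw [hc3, hdrop3] at hih
          rw [hih]
          simp [as_UNK_as_AdjectiveTagger_alt, hcond]
        · -- no match: copy one token, recurse
          have hstep : pvStepA sent (0, acc) i = (0, acc ++ [a]) := by
            simp only [pvStepA, ha, hb, hcgd]
            rw [if_neg (by omega), if_neg (by omega), if_neg hcond]
          have hih := IH (m - 1) (by omega) (i + 1) (acc ++ [a]) (by omega)
          have hc : ((i + 1 : Nat) : Int) = (i : Int) + 1 := by push_cast; ring
          rw [hc, hdrop1] at hih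
          rw [List.foldl_cons, hstep, hih]
          simp [as_UNK_as_AdjectiveTagger_alt, hcond]

-- ===== VERDICT (by name: the statement is the Claim_ definition above) =====
theorem as_UNK_as_AdjectiveTagger_spec : Claim_equal_as_UNK_as_AdjectiveTagger := by
  intro sent _
  unfold Spec_as_UNK_as_AdjectiveTagger as_UNK_as_AdjectiveTagger
  have := pv_main sent sent.length 0 [] (by omega)
  simpa using this
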